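-- pv_equiv track=rewrite | github.com/Ashiq-am/Path-of-Python | 39.Python Programming Examples/3.List Programs/Python – Test Common Elements Order/Method #1.py | common_ord
-- ===== SOURCE A (Python) =====
-- def common_ord(test_list1, test_list2):
-- 	comm = set(test_list1)
-- 	comm.intersection_update(test_list2)
-- 	pr_idx = 0
-- 	for ele in test_list1:
-- 		if ele in comm:
-- 			try:
-- 				pr_idx = test_list2.index(ele, pr_idx)
-- 			except ValueError:
-- 				return False
-- 	return True
-- ===== SOURCE B (Python) =====
-- def _first_geq(js, x, lo, hi):
--     # first element js[k] with lo <= k < hi and js[k] >= x (js sorted), or None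
--     if lo >= hi:
--         return None
--     mid = (lo + hi) // 2
--     m = js[mid]
--     if x <= m:
--         r = _first_geq(js, x, lo, mid)
--         return m if r is None else r
--     return _first_geq(js, x, mid + 1, hi)
--
--
-- def common_ord(test_list1, test_list2):
--     pos = {}
--     for i, v in enumerate(test_list2):
--         pos.setdefault(v, []).append(i)
--     pr_idx = 0
--     for ele in test_list1:
--         js = pos.get(ele)
--         if js is None:
--             continue
--         j = _first_geq(js, pr_idx, 0, len(js))
--         if j is None:
--             return False
--         pr_idx = j
--     return True
-- ===== Notes on version B (the rewrite author's own statement) =====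
-- stated objective: alternative
-- what changed: Replaces A's intersection set and repeated test_list2.index(ele, pr_idx) linear scans by a single pass building a value-to-index-list dict over test_list2 plus a binary search for the first stored occurrence index >= pr_idx per element of test_list1.
import Mathlib
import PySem

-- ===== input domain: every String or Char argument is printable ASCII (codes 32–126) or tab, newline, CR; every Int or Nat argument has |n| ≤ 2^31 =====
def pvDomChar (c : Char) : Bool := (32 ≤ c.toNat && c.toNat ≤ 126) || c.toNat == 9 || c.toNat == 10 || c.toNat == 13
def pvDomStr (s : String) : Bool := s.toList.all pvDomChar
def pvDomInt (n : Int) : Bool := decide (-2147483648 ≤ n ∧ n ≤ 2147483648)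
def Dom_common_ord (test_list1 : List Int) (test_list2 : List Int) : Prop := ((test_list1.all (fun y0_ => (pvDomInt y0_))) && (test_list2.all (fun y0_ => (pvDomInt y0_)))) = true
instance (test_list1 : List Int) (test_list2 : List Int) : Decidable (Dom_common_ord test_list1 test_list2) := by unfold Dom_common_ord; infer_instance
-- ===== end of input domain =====

-- B replaces A's repeated list2.index(ele, pr_idx) scans by a value → index-list dict over
-- list2 plus a binary search for the first stored index ≥ pr_idx (objective: alternative).
-- ===== PORT A =====
-- the loop 'for ele in test_list1: … pr_idx = test_list2.index(ele, pr_idx) …';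
-- test_list2.index(ele, pr_idx) with pr_idx ≥ 0 is ported by hand as index? on (drop pr_idx)
-- shifted back by pr_idx (exact: pr_idx is always a nonnegative in-bounds-or-clamped start).
def commonOrdLoopA (test_list2 : List Int) (comm : PySem.Set Int) : List Int → Nat → Bool
  | [], _ => true
  | ele :: rest, pr_idx =>
    if PySem.Set.contains comm ele then
      match PySem.List.index? (test_list2.drop pr_idx) ele with
      | none => false                                   -- except ValueError: return False
      | some j => commonOrdLoopA test_list2 comm rest (pr_idx + j)
    else commonOrdLoopA test_list2 comm rest pr_idx

def common_ord (test_list1 : List Int) (test_list2 : List Int) : Bool :=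
  let comm := PySem.Set.inter (PySem.Set.ofList test_list1) test_list2
  commonOrdLoopA test_list2 comm test_list1 0

-- ===== PORT B =====
-- _first_geq(js, x, lo, hi): binary search, first js[k] (lo ≤ k < hi) with x ≤ js[k]
def firstGeq (js : List Int) (x : Int) (lo hi : Nat) : Option Int :=
  if h : lo ≥ hi then none
  else
    let mid := (lo + hi) / 2       -- (lo + hi) // 2 on nonnegative ints = Nat division, exact
    let m := js.getD mid 0        -- js[mid] (in range: lo ≤ mid < hi ≤ len js at every call)
    if x ≤ m then
      match firstGeq js x lo mid with
      | none => some m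
      | some r => some r
    else firstGeq js x (mid + 1) hi
termination_by hi - lo
decreasing_by
  · omega
  · omega

-- the loop 'for ele in test_list1: js = pos.get(ele); …'
def commonOrdLoopB (pos : PySem.Dict Int (List Int)) : List Int → Int → Bool
  | [], _ => true
  | ele :: rest, pr_idx =>
    match pos.get? ele with
    | none => commonOrdLoopB pos rest pr_idx            -- continue
    | some js =>
      match firstGeq js pr_idx 0 js.length with
      | none => false
      | some j => commonOrdLoopB pos rest j

def common_ord_alt (test_list1 : List Int) (test_list2 : List Int) : Bool :=
  -- for i, v in enumerate(test_list2): pos.setdefault(v, []).append(i)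
  let pos := (PySem.List.enumerate test_list2 0).foldl
      (fun d p => d.modify p.2 [] (· ++ [p.1])) PySem.Dict.empty
  commonOrdLoopB pos test_list1 0

-- ===== PRECONDITION & SPEC =====
def Spec_common_ord (test_list1 : List Int) (test_list2 : List Int) (out : Bool) : Prop := out = common_ord_alt test_list1 test_list2
instance (test_list1 : List Int) (test_list2 : List Int) (out : Bool) : Decidable (Spec_common_ord test_list1 test_list2 out) := by unfold Spec_common_ord; infer_instance

-- ===== CLAIM (what is proved, stated in full; the proofs are below) =====
def Claim_equal_common_ord : Prop := ∀ (test_list1 : List Int) (test_list2 : List Int), Dom_common_ord test_list1 test_list2 → Spec_common_ord test_list1 test_list2 (common_ord test_list1 test_list2)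

-- ===== LEMMAS AND PROOFS =====

-- positions of v in l2, as the dict build produces them
def posList (l2 : List Int) (v : Int) (s : Int) : List Int :=
  ((PySem.List.enumerate l2 s).filter (fun p => p.2 == v)).map (·.1)

theorem posList_nil (v : Int) (s : Int) : posList [] v s = [] := rfl

theorem find?_congr' {α : Type} (l : List α) (p q : α → Bool)
    (h : ∀ a ∈ l, p a = q a) : l.find? p = l.find? q := by
  induction l with
  | nil => rfl
  | cons a l ih =>
    simp only [List.find?_cons, h a List.mem_cons_self]
    cases q a with
    | false => exact ih (fun b hb => h b (List.mem_cons_of_mem a hb))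
    | true => rfl

theorem posList_cons (a : Int) (l : List Int) (v s : Int) :
    posList (a :: l) v s = (if a = v then [s] else []) ++ posList l v (s + 1) := by
  by_cases h : a = v <;>
    simp [posList, PySem.List.enumerate_cons, h]

theorem posList_lb (l2 : List Int) (v s : Int) : ∀ j ∈ posList l2 v s, s ≤ j := by
  intro j hj
  simp only [posList, List.mem_map, List.mem_filter] at hj
  obtain ⟨p, ⟨hp, _⟩, rfl⟩ := hj
  rw [PySem.List.mem_enumerate_iff] at hp
  obtain ⟨k, _, rfl⟩ := hp
  simp

theorem posList_sorted (l2 : List Int) (v s : Int) :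
    (posList l2 v s).Pairwise (· ≤ ·) := by
  unfold posList
  rw [List.pairwise_map]
  exact ((PySem.List.pairwise_lt_enumerate l2 s).sublist List.filter_sublist).imp
    (fun h => le_of_lt h)

-- A's index(ele, pr) against B's first-position-≥ view of posList
theorem index_eq_find (l2 : List Int) (v : Int) :
    ∀ (p : Nat) (s : Int),
      (PySem.List.index? (l2.drop p) v).map (fun j => ((p + j : Nat) : Int) + s)
        = (posList l2 v s).find? (fun j => decide (s + (p : Int) ≤ j)) := by
  induction l2 with
  | nil => intro p s; simp [posList_nil, PySem.List.index?, List.drop_nil]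
  | cons a l ih =>
    intro p s
    rw [posList_cons]
    cases p with
    | zero =>
      rw [List.drop_zero]
      by_cases hav : a = v
      · subst hav
        rw [PySem.List.index?_cons_self]
        simp
      · rw [PySem.List.index?_cons_of_ne (h := hav)]
        have hIH := ih 0 (s + 1)
        simp only [List.drop_zero] at hIH
        have hcongr : (posList l v (s + 1)).find? (fun j => decide (s + ((0:Nat):Int) ≤ j))
            = (posList l v (s + 1)).find? (fun j => decide ((s + 1) + ((0:Nat):Int) ≤ j)) := by
          apply find?_congr'
          intro j hj
          have := posList_lb l v (s + 1) j hj
          simp; omega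
        simp only [if_neg hav, List.nil_append]
        rw [hcongr, ← hIH]
        cases PySem.List.index? l v with
        | none => simp
        | some j => simp; omega
    | succ q =>
      rw [List.drop_succ_cons]
      have hIH := ih q (s + 1)
      have hfind : ((if a = v then [s] else []) ++ posList l v (s + 1)).find?
            (fun j => decide (s + ((q + 1 : Nat) : Int) ≤ j))
          = (posList l v (s + 1)).find? (fun j => decide (s + ((q + 1 : Nat) : Int) ≤ j)) := by
        by_cases hav : a = v
        · simp only [hav]
          simp
        · simp [hav]
      rw [hfind]
      have hcongr : (posList l v (s + 1)).find? (fun j => decide (s + ((q + 1 : Nat) : Int) ≤ j))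
          = (posList l v (s + 1)).find? (fun j => decide ((s + 1) + ((q : Nat) : Int) ≤ j)) := by
        apply find?_congr'; intro j _; simp; omega
      rw [hcongr, ← hIH]
      cases PySem.List.index? (l.drop q) v with
      | none => simp
      | some j => simp; omega

-- segment js[lo:hi]
def seg (js : List Int) (lo hi : Nat) : List Int := (js.drop lo).take (hi - lo)

theorem seg_split (js : List Int) (lo mid hi : Nat) (h1 : lo ≤ mid) (h2 : mid ≤ hi) :
    seg js lo hi = seg js lo mid ++ seg js mid hi := by
  unfold seg
  have : hi - lo = (mid - lo) + (hi - mid) := by omega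
  rw [this, List.take_add, List.drop_drop]
  have h3 : lo + (mid - lo) = mid := by omega
  rw [h3]

theorem seg_singleton (js : List Int) (mid : Nat) (h : mid < js.length) :
    seg js mid (mid + 1) = [js[mid]] := by
  unfold seg
  rw [List.drop_eq_getElem_cons h]
  have h1 : mid + 1 - mid = 1 := by omega
  rw [h1, List.take_succ_cons, List.take_zero]

theorem seg_sublist (js : List Int) (lo hi : Nat) : (seg js lo hi).Sublist js :=
  ((js.drop lo).take_sublist _).trans (js.drop_sublist lo)

theorem firstGeq_eq_find (js : List Int) (x : Int) (hs : js.Pairwise (· ≤ ·)) :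
    ∀ lo hi, hi ≤ js.length →
      firstGeq js x lo hi = (seg js lo hi).find? (fun j => decide (x ≤ j)) := by
  intro lo hi
  induction hlh : hi - lo using Nat.strong_induction_on generalizing lo hi with
  | _ n ih =>
    intro hhi
    rw [firstGeq]
    by_cases hge : lo ≥ hi
    · rw [dif_pos hge]
      have h0 : seg js lo hi = [] := by
        unfold seg
        rw [show hi - lo = 0 by omega, List.take_zero]
      rw [h0]; rfl
    · rw [dif_neg hge]
      have hmid1 : lo ≤ (lo + hi) / 2 := by omega
      have hmid2 : (lo + hi) / 2 < hi := by omega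
      set mid := (lo + hi) / 2 with hmiddef
      have hmlt : mid < js.length := by omega
      have hgd : js.getD mid 0 = js[mid] := List.getD_eq_getElem js 0 hmlt
      have hsegm := seg_singleton js mid hmlt
      have hsortseg : (seg js lo (mid + 1)).Pairwise (· ≤ ·) :=
        hs.sublist (seg_sublist js lo (mid + 1))
      simp only [hgd]
      by_cases hx : x ≤ js[mid]
      · rw [if_pos hx]
        rw [ih (mid - lo) (by omega) lo mid (by omega) (by omega)]
        rw [seg_split js lo mid hi hmid1 (by omega), List.find?_append,
            seg_split js mid (mid + 1) hi (by omega) (by omega), hsegm]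
        cases hfd : (seg js lo mid).find? (fun j => decide (x ≤ j)) with
        | none => simp [hx]
        | some r => rw [Option.some_or]
      · rw [if_neg hx]
        rw [ih (hi - (mid + 1)) (by omega) (mid + 1) hi (by omega) hhi]
        rw [seg_split js lo (mid + 1) hi (by omega) (by omega), List.find?_append]
        have hnone : (seg js lo (mid + 1)).find? (fun j => decide (x ≤ j)) = none := by
          rw [List.find?_eq_none]
          intro j hj
          have hsplit := seg_split js lo mid (mid + 1) hmid1 (by omega)
          rw [hsplit, hsegm] at hj hsortseg
          rw [List.pairwise_append] at hsortseg
          rcases List.mem_append.mp hj with hj' | hj'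
          · have := hsortseg.2.2 j hj' js[mid] (List.mem_singleton_self _)
            simp only [decide_eq_true_eq]; omega
          · rw [List.mem_singleton] at hj'; subst hj'
            simp only [decide_eq_true_eq]; omega
        rw [hnone, Option.none_or]

-- the dict built by B, characterised
theorem pos_get? (l2 : List Int) (v : Int) :
    ((PySem.List.enumerate l2 0).foldl
        (fun d p => d.modify p.2 [] (· ++ [p.1])) PySem.Dict.empty).get? v
      = if v ∈ l2 then some (posList l2 v 0) else none := by
  set d := (PySem.List.enumerate l2 0).foldl
      (fun d p => d.modify p.2 [] (· ++ [p.1])) PySem.Dict.empty with hd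
  have hswap : d = ((PySem.List.enumerate l2 0).map (fun p => (p.2, p.1))).foldl
      (fun d p => d.modify p.1 [] (· ++ [p.2])) PySem.Dict.empty := by
    rw [hd, List.foldl_map]
  have hkeys : d.keys = PySem.Set.ofList l2 := by
    rw [hd]
    have := PySem.Dict.keys_foldl_modify_key (PySem.List.enumerate l2 0)
      (fun p : Int × Int => p.2) ([] : List Int)
      (fun _ p => (· ++ [p.1])) PySem.Dict.empty
    rw [this, PySem.Dict.keys_empty, PySem.Set.update_nil_left,
        PySem.List.map_snd_enumerate]
  have hgetD : d.getD v [] = posList l2 v 0 := by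
    rw [hswap, PySem.Dict.getD_foldl_modify_append, PySem.Dict.getD_empty]
    simp only [List.nil_append, posList]
    rw [List.filter_map, List.map_map]
    rfl
  by_cases hv : v ∈ l2
  · have hcont : d.contains v = true := by
      rw [PySem.Dict.contains_eq_decide_mem_keys, hkeys]
      simp [PySem.Set.mem_ofList, hv]
    have := PySem.Dict.contains_eq_isSome_get? d v
    rw [hcont] at this
    cases hg : d.get? v with
    | none => rw [hg] at this; simp at this
    | some w =>
      have : w = posList l2 v 0 := by
        have := PySem.Dict.getD_of_get?_eq_some (d := d) (d0 := []) hg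
        rw [← this, hgetD]
      rw [this, if_pos hv]
  · have hcont : d.contains v = false := by
      rw [PySem.Dict.contains_eq_decide_mem_keys, hkeys]
      simp [PySem.Set.mem_ofList, hv]
    have := PySem.Dict.contains_eq_isSome_get? d v
    rw [hcont] at this
    cases hg : d.get? v with
    | none => rw [if_neg hv]
    | some w => rw [hg] at this; simp at this

theorem loops_eq (l1 l2 : List Int) :
    ∀ (l : List Int), (∀ e ∈ l, e ∈ l1) → ∀ (p : Nat),
      commonOrdLoopA l2 (PySem.Set.inter (PySem.Set.ofList l1) l2) l p
        = commonOrdLoopB ((PySem.List.enumerate l2 0).foldl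
            (fun d p => d.modify p.2 [] (· ++ [p.1])) PySem.Dict.empty) l (p : Int) := by
  intro l
  induction l with
  | nil => intro _ _; rfl
  | cons e rest ih =>
    intro hmem p
    have he1 : e ∈ l1 := hmem e (List.mem_cons_self)
    have hrest : ∀ x ∈ rest, x ∈ l1 := fun x hx => hmem x (List.mem_cons_of_mem e hx)
    rw [commonOrdLoopA, commonOrdLoopB, pos_get?]
    by_cases he2 : e ∈ l2
    · have hcont : PySem.Set.contains (PySem.Set.inter (PySem.Set.ofList l1) l2) e = true := by
        rw [PySem.Set.contains_iff, PySem.Set.mem_inter, PySem.Set.mem_ofList]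
        exact ⟨he1, he2⟩
      rw [hcont, if_pos he2, if_pos rfl]
      have hfg := firstGeq_eq_find (posList l2 e 0) (p : Int) (posList_sorted l2 e 0)
        0 (posList l2 e 0).length (le_refl _)
      have hseg : seg (posList l2 e 0) 0 (posList l2 e 0).length = posList l2 e 0 := by
        unfold seg; simp
      rw [hseg] at hfg
      have hidx := index_eq_find l2 e p 0
      have hpred : (posList l2 e 0).find? (fun j => decide ((0:Int) + (p : Int) ≤ j))
          = (posList l2 e 0).find? (fun j => decide ((p : Int) ≤ j)) := by
        apply find?_congr'; intro j _; simp
      rw [hpred] at hidx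
      simp only [hfg, ← hidx]
      cases hI : PySem.List.index? (l2.drop p) e with
      | none => simp
      | some j =>
        simp only [Option.map_some]
        have := ih hrest (p + j)
        rw [this]
        have : ((p + j : Nat) : Int) + 0 = ((p + j : Nat) : Int) := by omega
        rw [this]
    · have hcont : PySem.Set.contains (PySem.Set.inter (PySem.Set.ofList l1) l2) e = false := by
        rw [Bool.eq_false_iff]
        intro hc
        rw [PySem.Set.contains_iff, PySem.Set.mem_inter] at hc
        exact he2 hc.2
      rw [hcont, if_neg he2]
      simp only [Bool.false_eq_true, if_false]
      exact ih hrest p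

-- ===== VERDICT (by name: the statement is the Claim_ definition above) =====
theorem common_ord_spec : Claim_equal_common_ord := by
  intro l1 l2 _
  unfold Spec_common_ord common_ord common_ord_alt
  have := loops_eq l1 l2 l1 (fun _ h => h) 0
  simpa using this
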